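-- pv_equiv track=rewrite | github.com/fatihturan/ps-gh-test | chat_bot_ai/chat_bot_ai.py | add_space_after_period
-- ===== SOURCE A (Python) =====
-- def add_space_after_period(text):
--     result = []
--     for i, char in enumerate(text):
--         result.append(char)
--         if char == '.':
--             if i + 1 < len(text):
--                 next_char = text[i + 1]
--                 if next_char.isalpha():
--                     result.append(' ')
--     return ''.join(result)
-- ===== SOURCE B (Python) =====
-- def add_space_after_period(text):
--     parts = text.split('.')
--     return parts[0] + ''.join(('. ' if p[:1].isalpha() else '.') + p
--                               for p in parts[1:])
-- ===== Notes on version B (the rewrite author's own statement) =====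
-- stated objective: faster
-- what changed: Replaced the character-by-character indexed loop with a staged split/join: split the text on the period character, then rejoin the parts with a period, adding a space when the following part starts with a letter.
import Mathlib
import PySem

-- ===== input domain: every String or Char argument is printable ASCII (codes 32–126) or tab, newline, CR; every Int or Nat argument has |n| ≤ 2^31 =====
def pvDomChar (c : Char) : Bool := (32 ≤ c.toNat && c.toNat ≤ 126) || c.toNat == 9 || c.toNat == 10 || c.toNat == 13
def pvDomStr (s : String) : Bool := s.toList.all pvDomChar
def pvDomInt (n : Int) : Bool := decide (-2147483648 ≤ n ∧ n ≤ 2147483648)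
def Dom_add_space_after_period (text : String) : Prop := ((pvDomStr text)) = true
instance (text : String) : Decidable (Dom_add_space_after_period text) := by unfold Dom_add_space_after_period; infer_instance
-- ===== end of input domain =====

-- B replaces the indexed character loop with a staged split on the period and rejoin with conditional space; measurably faster (C-level split/join vs per-character Python loop).


-- ===== PORT A =====
-- literal port: for i, char in enumerate(text): append char; if '.' and i+1 in range and text[i+1].isalpha(): append ' '
def add_space_after_period (text : String) : String :=
  let cs := text.toList
  let result : List Char :=
    (PySem.List.enumerate cs).foldl (fun acc p =>
      let acc := acc ++ [p.2]
      if p.2 = '.' then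
        if p.1 + 1 < (cs.length : Int) then
          match PySem.List.pyGet? cs (p.1 + 1) with   -- in range by the guard; none unreachable
          | some next_char => if PySem.Chars.isalpha next_char then acc ++ [' '] else acc
          | none => acc
        else acc
      else acc) []
  String.ofList result

-- ===== PORT B =====
-- port of Source B: parts = text.split('.'); parts[0] + ''.join(('. ' if p[:1].isalpha() else '.') + p for p in parts[1:])
-- split never returns an empty list, so parts[0] is headI (IndexError unreachable)
def add_space_after_period_alt (text : String) : String :=
  let parts := PySem.Chars.splitOn text.toList ['.']
  String.ofList (parts.headI ++
    parts.tail.flatMap (fun p =>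
      (if PySem.Chars.strIsalpha (PySem.List.slice p (some 0) (some 1)) then ['.', ' '] else ['.']) ++ p))

-- ===== PRECONDITION & SPEC =====
def Spec_add_space_after_period (text : String) (out : String) : Prop := out = add_space_after_period_alt text
instance (text : String) (out : String) : Decidable (Spec_add_space_after_period text out) := by unfold Spec_add_space_after_period; infer_instance

-- ===== CLAIM =====
def Claim_equal_add_space_after_period : Prop := ∀ (text : String), Dom_add_space_after_period text → Spec_add_space_after_period text (add_space_after_period text)

-- ===== LEMMAS AND PROOFS =====

-- common recursive characterisation of the inserted-space string
def pvGo : List Char → List Char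
  | [] => []
  | [c] => [c]
  | c :: b :: r =>
    if c = '.' ∧ PySem.Chars.isalpha b then c :: ' ' :: pvGo (b :: r) else c :: pvGo (b :: r)

-- A's fold equals pvGo
lemma pvA_go (suf : List Char) : ∀ (pre acc : List Char),
    (PySem.List.enumerate suf (pre.length : Int)).foldl (fun acc p =>
      let acc := acc ++ [p.2]
      if p.2 = '.' then
        if p.1 + 1 < (((pre ++ suf).length : Nat) : Int) then
          match PySem.List.pyGet? (pre ++ suf) (p.1 + 1) with
          | some next_char => if PySem.Chars.isalpha next_char then acc ++ [' '] else acc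
          | none => acc
        else acc
      else acc) acc = acc ++ pvGo suf := by
  induction suf with
  | nil => intro pre acc; simp [PySem.List.enumerate, pvGo]
  | cons c rest ih =>
    intro pre acc
    rw [PySem.List.enumerate_cons, List.foldl_cons]
    have hpre : ((pre.length : Int) + 1) = (((pre ++ [c]).length : Nat) : Int) := by
      simp
    have hrw : pre ++ c :: rest = (pre ++ [c]) ++ rest := by simp
    rw [hrw, hpre, ih (pre ++ [c])]
    cases rest with
    | nil =>
      have hout : ¬ ((((pre ++ [c]).length : Nat) : Int) < ((((pre ++ [c]) ++ ([] : List Char)).length : Nat) : Int)) := by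
        simp
      simp only [hout, if_false, pvGo]
      by_cases hc : c = '.' <;> simp only [hc, if_true, if_false] <;> simp
    | cons b r2 =>
      have hin : ((((pre ++ [c]).length : Nat) : Int) < (((pre ++ [c] ++ b :: r2).length : Nat) : Int)) := by
        simp
      have hget : PySem.List.pyGet? (pre ++ [c] ++ b :: r2) (((pre ++ [c]).length : Nat) : Int) = some b :=
        PySem.List.pyGet?_append_length _ _ _
      simp only [hin, if_true, hget]
      by_cases hc : c = '.'
      · by_cases hb : PySem.Chars.isalpha b <;> simp [hc, hb, pvGo]
      · simp [hc, pvGo]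

-- a clean recursive description of split-on-'.'
def pvSplitP : List Char → List (List Char)
  | [] => [[]]
  | c :: r => if c = '.' then [] :: pvSplitP r else (c :: (pvSplitP r).headI) :: (pvSplitP r).tail

lemma pvSplitP_ne_nil (l : List Char) : pvSplitP l ≠ [] := by
  cases l with
  | nil => simp [pvSplitP]
  | cons c r => unfold pvSplitP; split <;> simp

-- splitOn.go with sep = ['.'] computes pvSplitP
lemma pv_go_spec : ∀ (fuel : Nat) (l cur : List Char) (acc : List (List Char)),
    l.length < fuel →
    PySem.Chars.splitOn.go ['.'] fuel l cur acc =
      acc.reverse ++ (pvSplitP l).modifyHead (cur.reverse ++ ·) := by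
  intro fuel
  induction fuel with
  | zero => intro l cur acc h; omega
  | succ f ih =>
    intro l cur acc h
    cases l with
    | nil =>
      rw [PySem.Chars.splitOn.go]
      all_goals simp [pvSplitP]
    | cons c rest =>
      rw [PySem.Chars.splitOn.go]
      by_cases hc : c = '.'
      · have hpref : (['.'] : List Char).isPrefixOf (c :: rest) = true := by
          simp [hc, List.isPrefixOf]
        simp only [hpref, if_true, List.length_singleton, List.drop_succ_cons, List.drop_zero]
        rw [ih rest [] _ (by simp at h; omega)]
        subst hc
        simp [pvSplitP]
        cases hs : pvSplitP rest with
        | nil => exact absurd hs (pvSplitP_ne_nil rest)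
        | cons p0 t => simp [List.modifyHead]
      · have hpref : (['.'] : List Char).isPrefixOf (c :: rest) = false := by
          simp [List.isPrefixOf]; intro hcc; exact absurd hcc.symm hc
        simp only [hpref, Bool.false_eq_true, if_false]
        rw [ih rest (c :: cur) acc (by simp at h; omega)]
        simp only [pvSplitP, hc, if_false]
        cases hs : pvSplitP rest with
        | nil => exact absurd hs (pvSplitP_ne_nil rest)
        | cons p0 t => simp [List.modifyHead]

lemma pvSplitOn_eq (cs : List Char) : PySem.Chars.splitOn cs ['.'] = pvSplitP cs := by
  unfold PySem.Chars.splitOn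
  rw [pv_go_spec (cs.length + 1) cs [] [] (by omega)]
  cases hs : pvSplitP cs with
  | nil => exact absurd hs (pvSplitP_ne_nil cs)
  | cons p0 t => simp [List.modifyHead]

-- rejoining pvSplitP gives pvGo
lemma pvB_go (cs : List Char) :
    (pvSplitP cs).headI ++
      (pvSplitP cs).tail.flatMap (fun p =>
        (if PySem.Chars.strIsalpha (PySem.List.slice p (some 0) (some 1)) then ['.', ' '] else ['.']) ++ p)
      = pvGo cs := by
  induction cs with
  | nil => simp [pvSplitP, pvGo]
  | cons c rest ih =>
    by_cases hc : c = '.'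
    · subst hc
      simp only [pvSplitP, if_true, List.headI_cons, List.tail_cons, List.nil_append]
      cases hs : pvSplitP rest with
      | nil => exact absurd hs (pvSplitP_ne_nil rest)
      | cons p0 t =>
        rw [hs] at ih
        simp only [List.flatMap_cons, List.headI_cons, List.tail_cons] at ih ⊢
        rw [List.append_assoc, ih]
        -- relate the head of the first part to the head of rest
        cases rest with
        | nil =>
          simp [pvSplitP] at hs
          obtain ⟨h1, h2⟩ := hs
          subst h1; subst h2
          simp [pvGo, PySem.Chars.strIsalpha, PySem.List.slice]
        | cons b r2 =>
          by_cases hb : b = '.'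
          · subst hb
            simp [pvSplitP] at hs
            have hp0 : p0 = [] := hs.1
            simp [hp0, pvGo, PySem.Chars.strIsalpha, PySem.List.slice, PySem.Chars.isalpha,
              PySem.Chars.isupper, PySem.Chars.islower]
          · simp only [pvSplitP, hb, if_false, List.cons.injEq] at hs
            have hp0 : p0 = b :: (pvSplitP r2).headI := hs.1.symm
            have hsl : PySem.List.slice p0 (some 0) (some 1) = [b] := by
              rw [hp0]; simp [PySem.List.slice_to]
            rw [hsl]
            have : PySem.Chars.strIsalpha [b] = PySem.Chars.isalpha b := by
              simp [PySem.Chars.strIsalpha]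
            rw [this]
            by_cases ha : PySem.Chars.isalpha b <;> simp [pvGo, ha]
    · simp only [pvSplitP, hc, if_false, List.headI_cons, List.tail_cons, List.cons_append]
      rw [ih]
      cases rest with
      | nil => simp [pvGo]
      | cons b r2 => simp [pvGo, hc]

-- ===== VERDICT =====
theorem add_space_after_period_spec : Claim_equal_add_space_after_period := by
  intro text _
  unfold Spec_add_space_after_period add_space_after_period add_space_after_period_alt
  have hA := pvA_go text.toList [] []
  simp only [List.length_nil, Int.natCast_zero, List.nil_append] at hA
  simp only [hA, pvSplitOn_eq, pvB_go]
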